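-- pv_equiv track=rewrite | github.com/ac35/kripto | kripto_core/rsa/rsa_cipher.py | get_blocks_from_text
-- ===== SOURCE A (Python) =====
-- DEFAULT_BLOCK_SIZE = 128  # 128 bytes
--
-- BYTE_SIZE = 256  # One byte has 256 different values.
--
-- def get_blocks_from_text(message, block_size=DEFAULT_BLOCK_SIZE):
--     # konversi message (string) ke sebuah list berisi blok-blok
--     # integer, setiap integer merepresentasikan 128 (sesuai dgn
--     # ukuran blok) karakter string.
--
--     block_ints = []
--     for block_start in range(0, len(message), block_size):
--         # Proses blok integer untuk blok teks ini
--         block_int = 0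
--         for i in range(block_start, min(block_start + block_size, len(message))):
--             # block_int += ord(message[i]) * (BYTE_SIZE ** (i % block_size))  # ini utk python 2.7
--             block_int += message[i] * (BYTE_SIZE ** (i % block_size)) # ini utk python 3.X
--         block_ints.append(block_int)
--     return block_ints
-- ===== SOURCE B (Python) =====
-- DEFAULT_BLOCK_SIZE = 128  # 128 bytes
--
-- BYTE_SIZE = 256  # One byte has 256 different values.
--
-- def get_blocks_from_text(message, block_size=DEFAULT_BLOCK_SIZE):
--     # Staged decomposition: first slice the message into chunks, then
--     # encode each chunk with Horner's method over its reversed bytes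
--     # (acc = acc * BYTE_SIZE + b); no power 256**k is ever computed.
--     chunks = [message[i:i + block_size] for i in range(0, len(message), block_size)]
--     block_ints = []
--     for chunk in chunks:
--         acc = 0
--         for b in reversed(chunk):
--             acc = acc * BYTE_SIZE + b
--         block_ints.append(acc)
--     return block_ints
-- ===== Notes on version B (the rewrite author's own statement) =====
-- stated objective: faster
-- what changed: B first slices the message into chunks, then encodes each chunk with Horner's method over its reversed elements (acc = acc*256 + b), instead of A's index-based inner loop summing message[i] * 256**(i % block_size) with a fresh exponentiation per element.
import Mathlib
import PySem

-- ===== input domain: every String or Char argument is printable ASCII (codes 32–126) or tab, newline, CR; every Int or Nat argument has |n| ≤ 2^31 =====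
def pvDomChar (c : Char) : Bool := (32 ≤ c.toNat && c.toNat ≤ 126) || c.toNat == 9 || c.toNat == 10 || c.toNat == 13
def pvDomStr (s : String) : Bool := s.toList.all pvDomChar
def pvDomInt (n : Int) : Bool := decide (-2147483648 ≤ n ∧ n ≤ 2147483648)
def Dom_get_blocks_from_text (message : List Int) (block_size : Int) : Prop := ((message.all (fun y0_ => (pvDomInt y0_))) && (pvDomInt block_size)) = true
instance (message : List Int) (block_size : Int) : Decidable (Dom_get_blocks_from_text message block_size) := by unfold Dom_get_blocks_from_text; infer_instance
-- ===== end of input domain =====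

-- B slices the message into chunks first, then encodes each chunk by Horner's
-- multiply-accumulate over its reversed elements — no 256**k exponentiation
-- (objective: faster, constant-factor).

-- ===== PORT A =====
-- indices i drawn from the inner range are always in bounds, so pyGetD's default 0 is never used
def get_blocks_from_text (message : List Int) (block_size : Int) : List Int :=
  (PySem.List.pyRange 0 (message.length : Int) block_size).foldl
    (fun block_ints block_start =>
      block_ints ++
        [(PySem.List.pyRange block_start (min (block_start + block_size) (message.length : Int)) 1).foldl
          (fun block_int i =>
            block_int + PySem.List.pyGetD message i 0 * (256 : Int) ^ (PySem.Int.mod i block_size).toNat)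
          0])
    []

-- ===== PORT B =====
def get_blocks_from_text_alt (message : List Int) (block_size : Int) : List Int :=
  let chunks := (PySem.List.pyRange 0 (message.length : Int) block_size).map
      (fun i => PySem.List.slice message (some i) (some (i + block_size)))
  chunks.foldl
    (fun block_ints chunk =>
      block_ints ++ [chunk.reverse.foldl (fun acc b => acc * 256 + b) 0])
    []

-- ===== PRECONDITION & SPEC =====
-- Python A raises ValueError (range() step 0) exactly when block_size = 0; B raises there too.
def Pre_get_blocks_from_text (message : List Int) (block_size : Int) : Prop := block_size ≠ 0
instance (message : List Int) (block_size : Int) : Decidable (Pre_get_blocks_from_text message block_size) := by unfold Pre_get_blocks_from_text; infer_instance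

def pvWitness_get_blocks_from_text : List Int × Int := ([72, 101, 108, 108, 111], 2)

def Spec_get_blocks_from_text (message : List Int) (block_size : Int) (out : List Int) : Prop := out = get_blocks_from_text_alt message block_size
instance (message : List Int) (block_size : Int) (out : List Int) : Decidable (Spec_get_blocks_from_text message block_size out) := by unfold Spec_get_blocks_from_text; infer_instance

-- ===== CLAIM (what is proved, stated in full; the proofs are below) =====
def Claim_equal_get_blocks_from_text : Prop := ∀ (message : List Int) (block_size : Int), Dom_get_blocks_from_text message block_size → Pre_get_blocks_from_text message block_size → Spec_get_blocks_from_text message block_size (get_blocks_from_text message block_size)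

-- ===== LEMMAS AND PROOFS =====

-- Horner's foldr over the values drawn from the forward range equals the power-weighted sum.
lemma horner_foldr_eq_sum (m : List Int) :
    ∀ (k : Nat) (s : Int),
      List.foldr (fun i acc => acc * 256 + PySem.List.pyGetD m i 0) 0
          (PySem.List.pyRange s (s + k) 1)
        = ((PySem.List.pyRange s (s + k) 1).map
            (fun i => PySem.List.pyGetD m i 0 * (256 : Int) ^ (i - s).toNat)).sum := by
  intro k
  induction k with
  | zero =>
      intro s
      rw [PySem.List.pyRange_one_eq_nil (by omega)]
      simp
  | succ k ih =>
      intro s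
      have hlt : s < s + ((k : Nat) + 1 : Nat) := by push_cast; omega
      rw [PySem.List.pyRange_one_cons hlt]
      have hshift : s + ((k : Nat) + 1 : Nat) = (s + 1) + (k : Nat) := by push_cast; omega
      rw [hshift]
      simp only [List.foldr_cons, List.map_cons, List.sum_cons]
      rw [ih (s + 1)]
      have hpt : (PySem.List.pyRange (s + 1) ((s + 1) + (k : Nat)) 1).map
            (fun i => PySem.List.pyGetD m i 0 * (256 : Int) ^ (i - s).toNat)
          = (PySem.List.pyRange (s + 1) ((s + 1) + (k : Nat)) 1).map
            (fun i => (PySem.List.pyGetD m i 0 * (256 : Int) ^ (i - (s + 1)).toNat) * 256) := by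
        apply List.map_congr_left
        intro i hi
        have hib := PySem.List.mem_pyRange_one.mp hi
        have he : (i - s).toNat = (i - (s + 1)).toNat + 1 := by omega
        rw [he, pow_succ]
        ring
      rw [hpt, List.sum_map_mul_right]
      have : (s - s).toNat = 0 := by omega
      rw [this]
      ring

-- The chunk message[s : s+bs] is the list of in-range values pyGetD message i 0
-- for i in range(s, min(s+bs, len)), when 0 ≤ s ≤ len and 0 < bs.
lemma slice_eq_map_range (m : List Int) (bs s : Int) (hbs : 0 < bs) (hs : 0 ≤ s)
    (hsle : s ≤ (m.length : Int)) :
    PySem.List.slice m (some s) (some (s + bs))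
      = (PySem.List.pyRange s (min (s + bs) (m.length : Int)) 1).map
          (fun i => PySem.List.pyGetD m i 0) := by
  set e : Int := min (s + bs) (m.length : Int) with he
  have hfull : (PySem.List.pyRange s (m.length : Int) 1).map (fun i => PySem.List.pyGetD m i 0)
      = m.drop s.toNat := PySem.List.map_pyGetD_pyRange m 0 hs
  have hsplit : PySem.List.pyRange s (m.length : Int) 1
      = PySem.List.pyRange s e 1 ++ PySem.List.pyRange e (m.length : Int) 1 :=
    PySem.List.pyRange_one_append s e (m.length : Int) (by omega) (by omega)
  rw [hsplit, List.map_append] at hfull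
  have hlen : ((PySem.List.pyRange s e 1).map (fun i => PySem.List.pyGetD m i 0)).length
      = (e - s).toNat := by
    rw [List.length_map, PySem.List.length_pyRange_one]
  have htake := congrArg (List.take (e - s).toNat) hfull
  rw [List.take_append_of_le_length (by omega), List.take_of_length_le (by omega)] at htake
  rw [PySem.List.slice_toNat m hs (by omega : (0:Int) ≤ s + bs), htake, List.take_eq_take_iff]
  have hd : (m.drop s.toNat).length = m.length - s.toNat := by simp
  omega

-- Per-block equality: A's inner weighted sum = Horner over the reversed chunk.
lemma block_eq (m : List Int) (bs s : Int) (hbs : 0 < bs) (hs : 0 ≤ s)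
    (hslt : s < (m.length : Int)) (hdvd : bs ∣ s) :
    (PySem.List.pyRange s (min (s + bs) (m.length : Int)) 1).foldl
        (fun block_int i =>
          block_int + PySem.List.pyGetD m i 0 * (256 : Int) ^ (PySem.Int.mod i bs).toNat) 0
      = (PySem.List.slice m (some s) (some (s + bs))).reverse.foldl
          (fun acc b => acc * 256 + b) 0 := by
  set e : Int := min (s + bs) (m.length : Int) with he
  have hse : s ≤ e := by omega
  -- A's exponent: i % bs = i - s on the block
  have hmod : ∀ i ∈ PySem.List.pyRange s e 1,
      (PySem.Int.mod i bs).toNat = (i - s).toNat := by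
    intro i hi
    have hib := PySem.List.mem_pyRange_one.mp hi
    obtain ⟨q, hq⟩ := hdvd
    have h1 : i = (i - s) + bs * q := by omega
    have h2 : i % bs = i - s := by
      conv_lhs => rw [h1]
      rw [Int.add_mul_emod_self_left, Int.emod_eq_of_lt (by omega) (by omega)]
    rw [PySem.Int.mod_eq_emod_of_pos hbs, h2]
  have hA : (PySem.List.pyRange s e 1).foldl
        (fun block_int i =>
          block_int + PySem.List.pyGetD m i 0 * (256 : Int) ^ (PySem.Int.mod i bs).toNat) 0
      = (PySem.List.pyRange s e 1).foldl
        (fun block_int i =>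
          block_int + PySem.List.pyGetD m i 0 * (256 : Int) ^ (i - s).toNat) 0 := by
    apply PySem.List.foldl_congr_mem
    intro acc i hi
    rw [hmod i hi]
  rw [hA, PySem.List.foldl_add]
  -- B's side: foldl over the reversed chunk = foldr over the chunk = Horner
  rw [slice_eq_map_range m bs s hbs hs (by omega), List.foldl_reverse, List.foldr_map, ← he]
  have hk : e = s + ((e - s).toNat : Int) := by omega
  rw [hk, horner_foldr_eq_sum m (e - s).toNat s]
  simp

-- For a negative step, Python's range(0, n, step) with n ≥ 0 is empty.
lemma pyRange_neg_step_nil (n bs : Int) (hn : 0 ≤ n) (hbs : bs < 0) :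
    PySem.List.pyRange 0 n bs = [] := by
  rw [PySem.List.pyRange]
  simp only [if_neg (by omega : ¬ bs = 0)]
  rw [if_neg (by omega : ¬ (0:Int) < bs), if_neg (by omega : ¬ n < 0)]
  simp

-- ===== VERDICT (by name: the statement is the Claim_ definition above) =====
theorem get_blocks_from_text_spec : Claim_equal_get_blocks_from_text := by
  intro message bs _ hpre
  unfold Spec_get_blocks_from_text get_blocks_from_text get_blocks_from_text_alt
  rcases lt_trichotomy bs 0 with hneg | hz | hpos
  · rw [pyRange_neg_step_nil (message.length : Int) bs (by positivity) hneg]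
    rfl
  · exact absurd hz hpre
  · simp only [List.foldl_map]
    apply Eq.symm
    apply PySem.List.foldl_congr_mem
    intro acc s hs
    have hm := (PySem.List.mem_pyRange_iff_of_pos hpos s).mp hs
    have hdvd : bs ∣ s := by
      have := hm.2.2
      simpa using this
    rw [block_eq message bs s hpos hm.1 hm.2.1 hdvd]
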